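-- pv_equiv track=rewrite | github.com/koncaalp/BIOINFORMATICS | gaps_only_in_seq2/key.py | scorePair
-- ===== SOURCE A (Python) =====
-- def scorePair(seq1, aligned_seq2, subMatrix,gapOpen=-8,gapExtension=-6):
--     score = 0
--     assert len(seq1) == len(aligned_seq2), "Lengths must be equal"
--     for i in range(len(seq1)):          #check if gap is opening or extension
--         if aligned_seq2[i] == '-':
--             if i != 0 and aligned_seq2[i-1] == '-':
--                 score += gapExtension
--             else:
--                 score += gapOpen
--         else:               #if it is not gap add score from matrix
--             score += subMatrix[seq1[i]][aligned_seq2[i]]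
--     return score
-- ===== SOURCE B (Python) =====
-- def scorePair(seq1, aligned_seq2, subMatrix, gapOpen=-8, gapExtension=-6):
--     assert len(seq1) == len(aligned_seq2), "Lengths must be equal"
--     match_score = sum(subMatrix[a][b] for a, b in zip(seq1, aligned_seq2) if b != '-')
--     dashes = aligned_seq2.count('-')
--     opens = sum(1 for prev, cur in zip(' ' + aligned_seq2, aligned_seq2)
--                 if cur == '-' and prev != '-')
--     return match_score + opens * gapOpen + (dashes - opens) * gapExtension
-- ===== Notes on version B (the rewrite author's own statement) =====
-- stated objective: alternative
-- what changed: Replaces A's single indexed loop with i-1 lookback by two independent passes: a zip-comprehension sum of substitution scores over non-gap columns, plus a closed-form gap score opens*gapOpen + (dashes-opens)*gapExtension where opens counts run starts via a shifted zip and dashes is a count.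
import Mathlib
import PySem

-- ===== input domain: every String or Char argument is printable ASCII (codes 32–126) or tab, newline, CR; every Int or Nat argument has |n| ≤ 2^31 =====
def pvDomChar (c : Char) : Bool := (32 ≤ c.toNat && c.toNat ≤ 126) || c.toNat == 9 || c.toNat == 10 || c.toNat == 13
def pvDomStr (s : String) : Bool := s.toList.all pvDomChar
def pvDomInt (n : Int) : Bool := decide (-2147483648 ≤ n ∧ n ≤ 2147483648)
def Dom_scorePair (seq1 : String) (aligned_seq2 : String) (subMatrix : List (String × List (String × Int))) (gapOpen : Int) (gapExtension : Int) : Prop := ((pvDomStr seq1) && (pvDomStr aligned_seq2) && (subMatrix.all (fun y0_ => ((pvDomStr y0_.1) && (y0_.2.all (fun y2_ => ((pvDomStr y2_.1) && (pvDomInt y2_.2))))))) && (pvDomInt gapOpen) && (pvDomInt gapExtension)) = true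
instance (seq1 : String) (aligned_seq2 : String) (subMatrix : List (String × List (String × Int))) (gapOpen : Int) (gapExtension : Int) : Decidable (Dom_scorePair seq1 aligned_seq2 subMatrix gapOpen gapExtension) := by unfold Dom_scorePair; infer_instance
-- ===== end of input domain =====

-- B replaces A's single indexed loop (with i-1 lookback) by two independent passes: a zip sum of
-- substitution scores over non-gap columns plus a closed-form gap score opens*gapOpen +
-- (dashes-opens)*gapExtension (objective: alternative decomposition, same cost).

-- subMatrix[a][b] lookup (Python dict subscript; missing keys are excluded by Pre_scorePair)
def subLook (subMatrix : List (String × List (String × Int))) (a b : Char) : Int :=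
  PySem.Dict.getD (PySem.Dict.mk (PySem.Dict.getD (PySem.Dict.mk subMatrix) (String.mk [a]) [])) (String.mk [b]) 0

-- ===== PORT A =====
-- the body of A's "for i in range(len(seq1))" loop
def stepA (subMatrix : List (String × List (String × Int))) (gapOpen gapExtension : Int)
    (l1 l2 : List Char) (score : Int) (i : Nat) : Int :=
  match PySem.List.pyGet? l2 (i : Int) with
  | some c =>
    if c = '-' then
      if i ≠ 0 ∧ PySem.List.pyGet? l2 ((i : Int) - 1) = some '-' then
        score + gapExtension
      else
        score + gapOpen
    else
      match PySem.List.pyGet? l1 (i : Int) with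
      | some a => score + subLook subMatrix a c
      | none => score
  | none => score

def scorePair (seq1 : String) (aligned_seq2 : String) (subMatrix : List (String × List (String × Int))) (gapOpen : Int) (gapExtension : Int) : Int :=
  let l1 := seq1.toList
  let l2 := aligned_seq2.toList
  (List.range l1.length).foldl (stepA subMatrix gapOpen gapExtension l1 l2) 0

-- ===== PORT B =====
def scorePair_alt (seq1 : String) (aligned_seq2 : String) (subMatrix : List (String × List (String × Int))) (gapOpen : Int) (gapExtension : Int) : Int :=
  let l1 := seq1.toList
  let l2 := aligned_seq2.toList
  let matchScore : Int :=
    ((l1.zip l2).filter (fun p => p.2 != '-')).foldl (fun acc p => acc + subLook subMatrix p.1 p.2) 0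
  let dashes : Int := (l2.count '-' : Int)
  let opens : Int := ((((' ' :: l2).zip l2).filter (fun p => p.2 == '-' && p.1 != '-')).length : Int)
  matchScore + opens * gapOpen + (dashes - opens) * gapExtension

-- ===== PRECONDITION & SPEC =====
-- Pre_ excludes: unequal lengths (A's assert raises AssertionError) and non-gap columns whose
-- characters are not keys of subMatrix (A raises KeyError).
def Pre_scorePair (seq1 : String) (aligned_seq2 : String) (subMatrix : List (String × List (String × Int))) (gapOpen : Int) (gapExtension : Int) : Prop :=
  seq1.toList.length = aligned_seq2.toList.length ∧
  ((seq1.toList.zip aligned_seq2.toList).all (fun p =>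
    p.2 == '-' ||
    (match (PySem.Dict.mk subMatrix).get? (String.mk [p.1]) with
     | some inner => ((PySem.Dict.mk inner).get? (String.mk [p.2])).isSome
     | none => false)) = true)
instance (seq1 : String) (aligned_seq2 : String) (subMatrix : List (String × List (String × Int))) (gapOpen : Int) (gapExtension : Int) : Decidable (Pre_scorePair seq1 aligned_seq2 subMatrix gapOpen gapExtension) := by unfold Pre_scorePair; infer_instance

def pvWitness_scorePair : String × String × (List (String × List (String × Int))) × Int × Int :=
  ("ACA", "A--", [("A", [("A", 4), ("C", -2)]), ("C", [("A", -1), ("C", 3)])], -8, -6)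

def Spec_scorePair (seq1 : String) (aligned_seq2 : String) (subMatrix : List (String × List (String × Int))) (gapOpen : Int) (gapExtension : Int) (out : Int) : Prop := out = scorePair_alt seq1 aligned_seq2 subMatrix gapOpen gapExtension
instance (seq1 : String) (aligned_seq2 : String) (subMatrix : List (String × List (String × Int))) (gapOpen : Int) (gapExtension : Int) (out : Int) : Decidable (Spec_scorePair seq1 aligned_seq2 subMatrix gapOpen gapExtension out) := by unfold Spec_scorePair; infer_instance

-- ===== CLAIM (what is proved, stated in full; the proofs are below) =====
def Claim_equal_scorePair : Prop := ∀ (seq1 : String) (aligned_seq2 : String) (subMatrix : List (String × List (String × Int))) (gapOpen : Int) (gapExtension : Int), Dom_scorePair seq1 aligned_seq2 subMatrix gapOpen gapExtension → Pre_scorePair seq1 aligned_seq2 subMatrix gapOpen gapExtension → Spec_scorePair seq1 aligned_seq2 subMatrix gapOpen gapExtension (scorePair seq1 aligned_seq2 subMatrix gapOpen gapExtension)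

-- ===== LEMMAS AND PROOFS =====

-- common recursive characterization: score of the alignment threading the previous char of seq2
def gapgo (subMatrix : List (String × List (String × Int))) (gO gE : Int) : Char → List (Char × Char) → Int
  | _, [] => 0
  | prev, (a, b) :: rest =>
    (if b = '-' then (if prev = '-' then gE else gO) else subLook subMatrix a b) + gapgo subMatrix gO gE b rest

lemma A_gen (subM : List (String × List (String × Int))) (gO gE : Int) :
    ∀ (t1 t2 q1 q2 : List Char) (prev : Char) (acc : Int), q1.length = q2.length →
    t1.length = t2.length → ((q2 = [] ∧ prev = ' ') ∨ ∃ q2', q2 = q2' ++ [prev]) →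
    (List.range' q1.length t1.length).foldl (stepA subM gO gE (q1 ++ t1) (q2 ++ t2)) acc
      = acc + gapgo subM gO gE prev (t1.zip t2) := by
  intro t1
  induction t1 with
  | nil =>
    intro t2 q1 q2 prev acc hq ht _
    cases t2 with
    | cons c cs => simp at ht
    | nil => simp [gapgo]
  | cons a t1 ih =>
    intro t2 q1 q2 prev acc hq ht hlast
    cases t2 with
    | nil => simp at ht
    | cons b t2 =>
      simp only [List.length_cons]
      rw [List.range'_succ, List.foldl_cons]
      have hstep : stepA subM gO gE (q1 ++ a :: t1) (q2 ++ b :: t2) acc q1.length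
          = acc + (if b = '-' then (if prev = '-' then gE else gO) else subLook subM a b) := by
        rcases hlast with ⟨hq2, hprev⟩ | ⟨q2', rfl⟩
        · subst hq2; subst hprev
          have hq1 : q1 = [] := by simpa using hq
          subst hq1
          unfold stepA
          by_cases hb : b = '-' <;> simp [hb]
        · have hne : q1.length ≠ 0 := by simp [hq]
          have e1 : PySem.List.pyGet? (q1 ++ a :: t1) ((q1.length : Int)) = some a := by
            simp
          have e2 : PySem.List.pyGet? ((q2' ++ [prev]) ++ b :: t2) ((q1.length : Int)) = some b := by
            rw [hq]
            exact PySem.List.pyGet?_append_length ..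
          have hidx : ((q1.length : Int)) - 1 = (q2'.length : Int) := by simp [hq]
          have eprev : PySem.List.pyGet? ((q2' ++ [prev]) ++ b :: t2) ((q1.length : Int) - 1)
              = some prev := by
            rw [hidx, List.append_assoc]; simp
          unfold stepA
          rw [e2, eprev]
          by_cases hb : b = '-' <;> by_cases hp : prev = '-' <;> simp [hb, hp, hne]
      rw [hstep]
      have hre1 : q1 ++ a :: t1 = (q1 ++ [a]) ++ t1 := by simp
      have hre2 : q2 ++ b :: t2 = (q2 ++ [b]) ++ t2 := by simp
      have hih := ih t2 (q1 ++ [a]) (q2 ++ [b]) b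
        (acc + (if b = '-' then (if prev = '-' then gE else gO) else subLook subM a b))
        (by simp [hq]) (by simpa using ht) (Or.inr ⟨q2, rfl⟩)
      simp only [List.length_append, List.length_cons, List.length_nil] at hih
      rw [hre1, hre2, hih]
      simp [gapgo]
      ring

lemma B_gen (subM : List (String × List (String × Int))) (gO gE : Int) :
    ∀ (t1 t2 : List Char) (prev : Char), t1.length = t2.length →
    gapgo subM gO gE prev (t1.zip t2)
      = (((t1.zip t2).filter (fun p => p.2 != '-')).map (fun p => subLook subM p.1 p.2)).sum
        + ((((prev :: t2).zip t2).filter (fun p => p.2 == '-' && p.1 != '-')).length : Int) * gO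
        + (((t2.count '-' : Int)) - ((((prev :: t2).zip t2).filter (fun p => p.2 == '-' && p.1 != '-')).length : Int)) * gE := by
  intro t1
  induction t1 with
  | nil =>
    intro t2 prev ht
    cases t2 with
    | cons c cs => simp at ht
    | nil => simp [gapgo]
  | cons a t1 ih =>
    intro t2 prev ht
    cases t2 with
    | nil => simp at ht
    | cons b t2 =>
      have hih := ih t2 b (by simpa using ht)
      rcases eq_or_ne b '-' with rfl | hb
      · rcases eq_or_ne prev '-' with rfl | hp
        · simp [gapgo, hih]
          ring
        · simp [gapgo, hp, hih]
          ring
      · simp [gapgo, hb, hih]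
        ring

-- ===== VERDICT (by name: the statement is the Claim_ definition above) =====
theorem scorePair_spec : Claim_equal_scorePair := by
  intro seq1 seq2 subM gO gE _dom pre
  unfold Spec_scorePair scorePair scorePair_alt
  obtain ⟨hlen, -⟩ := pre
  have hA := A_gen subM gO gE seq1.toList seq2.toList [] [] ' ' 0 rfl hlen
    (Or.inl ⟨rfl, rfl⟩)
  simp only [List.nil_append, List.length_nil] at hA
  have hB := B_gen subM gO gE seq1.toList seq2.toList ' ' hlen
  dsimp only
  rw [List.range_eq_range', hA, hB, PySem.List.foldl_add]
  ring
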